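-- pv_equiv track=rewrite | github.com/microsoft/amplifier-bundle-filesystem | modules/tool-apply-patch/amplifier_module_tool_apply_patch/engines/native.py | _format_content_hint
-- ===== SOURCE A (Python) =====
-- _MAX_CONTENT_HINT_LINES = 200
--
-- def _format_content_hint(content: str, path: str) -> str:
--     """Format file content for error messages so models can self-correct.
--
--     When a patch fails (context mismatch, file already exists), including the
--     current file content lets the model construct a correct diff on the next
--     attempt — breaking retry loops without a separate read_file round-trip.
--     """
--     if not content:
--         return "\n\nFile is empty (0 lines)."
--
--     lines = content.splitlines()
--     total = len(lines)
--
--     if total <= _MAX_CONTENT_HINT_LINES: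
--         numbered = "\n".join(f"{i + 1}\t{line}" for i, line in enumerate(lines))
--     else:
--         head_n = _MAX_CONTENT_HINT_LINES * 2 // 3
--         tail_n = _MAX_CONTENT_HINT_LINES - head_n
--         head = "\n".join(f"{i + 1}\t{line}" for i, line in enumerate(lines[:head_n]))
--         tail_start = total - tail_n
--         tail = "\n".join(
--             f"{i + 1}\t{line}" for i, line in enumerate(lines[tail_start:], tail_start)
--         )
--         omitted = total - head_n - tail_n
--         numbered = f"{head}\n... [{omitted} lines omitted] ...\n{tail}"
--
--     return f"\n\nCurrent content of {path} ({total} lines):\n{numbered}"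
-- ===== SOURCE B (Python) =====
-- _MAX_CONTENT_HINT_LINES = 200
--
-- def _format_content_hint(content: str, path: str) -> str:
--     if not content:
--         return "\n\nFile is empty (0 lines)."
--     lines = content.splitlines()
--     total = len(lines)
--     # One pass: decide per index whether to emit the numbered line, the
--     # elision marker, or nothing, then join once.  In the short case the
--     # window covers everything so the marker can never fire.
--     if total <= _MAX_CONTENT_HINT_LINES:
--         head_n, tail_start = total, total
--     else:
--         head_n = _MAX_CONTENT_HINT_LINES * 2 // 3
--         tail_start = total - (_MAX_CONTENT_HINT_LINES - head_n)
--     parts = []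
--     for i, line in enumerate(lines):
--         if i == head_n and head_n < tail_start:
--             parts.append(f"... [{tail_start - head_n} lines omitted] ...")
--         if i < head_n or i >= tail_start:
--             parts.append(f"{i + 1}\t{line}")
--     return f"\n\nCurrent content of {path} ({total} lines):\n" + "\n".join(parts)
-- ===== Notes on version B (the rewrite author's own statement) =====
-- stated objective: alternative
-- what changed: B replaces A's branch of separately built/sliced/joined head and tail strings by a single pass over all lines with one emission rule (emit the line iff its index is outside the omitted window, emit the marker exactly at the window's start) and one final join.
import Mathlib
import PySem

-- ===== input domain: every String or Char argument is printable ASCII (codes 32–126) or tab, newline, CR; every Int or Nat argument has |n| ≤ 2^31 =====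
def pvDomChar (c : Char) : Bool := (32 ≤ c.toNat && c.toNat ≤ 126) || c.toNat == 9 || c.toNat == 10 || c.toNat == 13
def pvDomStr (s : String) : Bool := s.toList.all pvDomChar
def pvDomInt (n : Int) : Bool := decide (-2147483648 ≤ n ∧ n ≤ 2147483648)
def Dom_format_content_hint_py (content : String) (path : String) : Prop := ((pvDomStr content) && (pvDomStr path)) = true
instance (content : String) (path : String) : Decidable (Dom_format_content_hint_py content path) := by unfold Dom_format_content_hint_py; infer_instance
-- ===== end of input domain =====

-- B replaces A's branch of separately built/sliced/joined head and tail strings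
-- by a single pass over all lines (emit the numbered line iff its index is
-- outside the omitted window, emit the marker at the window's start) and one
-- final join; objective: alternative decomposition, same cost.

-- shared line formatter: f"{i + 1}\t{line}"
def pvFmtLine (p : Int × String) : String := PySem.Int.toStr (p.1 + 1) ++ "\t" ++ p.2

-- ===== PORT A =====
def format_content_hint_py (content : String) (path : String) : String :=
  if content = "" then "\n\nFile is empty (0 lines)."
  else
    let lines := PySem.Str.splitlines content
    let total : Int := lines.length
    let numbered :=
      if total ≤ 200 then
        PySem.Str.join "\n" ((PySem.List.enumerate lines 0).map pvFmtLine)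
      else
        let head_n : Int := PySem.Int.floordiv (200 * 2) 3
        let tail_n : Int := 200 - head_n
        let head := PySem.Str.join "\n"
          ((PySem.List.enumerate (PySem.List.slice lines none (some head_n)) 0).map pvFmtLine)
        let tail_start := total - tail_n
        let tail := PySem.Str.join "\n"
          ((PySem.List.enumerate (PySem.List.slice lines (some tail_start) none) tail_start).map pvFmtLine)
        let omitted := total - head_n - tail_n
        head ++ "\n" ++ ("... [" ++ PySem.Int.toStr omitted ++ " lines omitted] ...") ++ "\n" ++ tail
    "\n\nCurrent content of " ++ path ++ " (" ++ PySem.Int.toStr total ++ " lines):\n" ++ numbered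

-- ===== PORT B =====
def format_content_hint_py_alt (content : String) (path : String) : String :=
  if content = "" then "\n\nFile is empty (0 lines)."
  else
    let lines := PySem.Str.splitlines content
    let total : Int := lines.length
    let hw : Int × Int :=
      if total ≤ 200 then (total, total)
      else
        let head_n : Int := PySem.Int.floordiv (200 * 2) 3
        (head_n, total - (200 - head_n))
    let head_n := hw.1
    let tail_start := hw.2
    let parts := (PySem.List.enumerate lines 0).foldl (fun acc p =>
      let acc := if p.1 = head_n ∧ head_n < tail_start
        then acc ++ ["... [" ++ PySem.Int.toStr (tail_start - head_n) ++ " lines omitted] ..."]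
        else acc
      if p.1 < head_n ∨ tail_start ≤ p.1 then acc ++ [pvFmtLine p] else acc) []
    "\n\nCurrent content of " ++ path ++ " (" ++ PySem.Int.toStr total ++ " lines):\n"
      ++ PySem.Str.join "\n" parts

-- ===== PRECONDITION & SPEC =====
def Spec_format_content_hint_py (content : String) (path : String) (out : String) : Prop := out = format_content_hint_py_alt content path
instance (content : String) (path : String) (out : String) : Decidable (Spec_format_content_hint_py content path out) := by unfold Spec_format_content_hint_py; infer_instance

-- ===== CLAIM =====
def Claim_equal_format_content_hint_py : Prop := ∀ (content : String) (path : String), Dom_format_content_hint_py content path → Spec_format_content_hint_py content path (format_content_hint_py content path)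

-- ===== LEMMAS AND PROOFS =====

-- B's per-index emission rule, as a list-valued function
def pvG (h t : Int) (p : Int × String) : List String :=
  (if p.1 = h ∧ h < t then ["... [" ++ PySem.Int.toStr (t - h) ++ " lines omitted] ..."] else [])
  ++ (if p.1 < h ∨ t ≤ p.1 then [pvFmtLine p] else [])

theorem pv_parts (l : List (Int × String)) (h t : Int) :
    l.foldl (fun acc p =>
      let acc := if p.1 = h ∧ h < t
        then acc ++ ["... [" ++ PySem.Int.toStr (t - h) ++ " lines omitted] ..."]
        else acc
      if p.1 < h ∨ t ≤ p.1 then acc ++ [pvFmtLine p] else acc) []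
    = l.flatMap (pvG h t) := by
  have hf : (fun (acc : List String) (p : Int × String) =>
      let acc := if p.1 = h ∧ h < t
        then acc ++ ["... [" ++ PySem.Int.toStr (t - h) ++ " lines omitted] ..."]
        else acc
      if p.1 < h ∨ t ≤ p.1 then acc ++ [pvFmtLine p] else acc)
      = fun acc p => acc ++ pvG h t p := by
    funext acc p
    simp only [pvG]
    split_ifs <;> simp
  rw [hf, PySem.List.foldl_append_eq_flatMap]
  simp

theorem pv_short (h t : Int) (ht : t ≤ h) (l : List (Int × String)) :
    l.flatMap (pvG h t) = l.map pvFmtLine := by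
  induction l with
  | nil => simp
  | cons p l ih =>
    have h1 : ¬ (p.1 = h ∧ h < t) := by omega
    have h2 : p.1 < h ∨ t ≤ p.1 := by omega
    simp [pvG, h1, h2, ih]

theorem pv_after (h t : Int) (xs : List String) : ∀ (s : Int), h < s →
    (PySem.List.enumerate xs s).flatMap (pvG h t)
      = ((PySem.List.enumerate xs s).drop (t - s).toNat).map pvFmtLine := by
  induction xs with
  | nil => intro s _; simp [PySem.List.enumerate_nil]
  | cons x xs ih =>
    intro s hs
    have h1 : ¬ ((s, x).1 = h ∧ h < t) := by simp; omega
    by_cases hts : t ≤ s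
    · have h2 : (s, x).1 < h ∨ t ≤ (s, x).1 := by simp; omega
      have d1 : (t - s).toNat = 0 := by omega
      have d2 : (t - (s + 1)).toNat = 0 := by omega
      simp only [PySem.List.enumerate_cons, List.flatMap_cons, pvG, if_neg h1, if_pos h2,
        ih (s + 1) (by omega), d1, d2, List.drop_zero]
      simp
    · have h2 : ¬ ((s, x).1 < h ∨ t ≤ (s, x).1) := by simp; omega
      have d1 : (t - s).toNat = (t - (s + 1)).toNat + 1 := by omega
      simp only [PySem.List.enumerate_cons, List.flatMap_cons, pvG, if_neg h1, if_neg h2,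
        ih (s + 1) (by omega), d1, List.drop_succ_cons]
      simp

theorem pv_long (h t : Int) (xs : List String) : ∀ (s : Int), s ≤ h → h < t →
    h < s + (xs.length : Int) →
    (PySem.List.enumerate xs s).flatMap (pvG h t)
      = ((PySem.List.enumerate xs s).take (h - s).toNat).map pvFmtLine
        ++ ("... [" ++ PySem.Int.toStr (t - h) ++ " lines omitted] ...")
          :: ((PySem.List.enumerate xs s).drop (t - s).toNat).map pvFmtLine := by
  induction xs with
  | nil => intro s h1 _ h3; simp at h3; omega
  | cons x xs ih =>
    intro s hsh hht hb
    by_cases he : s = h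
    · subst he
      have h1 : ((s, x).1 = s ∧ s < t) := by simp; omega
      have h2 : ¬ ((s, x).1 < s ∨ t ≤ (s, x).1) := by simp; omega
      have d0 : (s - s).toNat = 0 := by omega
      have d1 : (t - s).toNat = (t - (s + 1)).toNat + 1 := by omega
      simp only [PySem.List.enumerate_cons, List.flatMap_cons, pvG, if_neg h2,
        pv_after s t xs (s + 1) (by omega), d0, d1, List.take_zero, List.drop_succ_cons]
      simp [hht]
    · have hs : s < h := by omega
      have h1 : ¬ ((s, x).1 = h ∧ h < t) := by simp; omega
      have h2 : ((s, x).1 < h ∨ t ≤ (s, x).1) := by simp; omega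
      have d0 : (h - s).toNat = (h - (s + 1)).toNat + 1 := by omega
      have d1 : (t - s).toNat = (t - (s + 1)).toNat + 1 := by omega
      have hb' : h < (s + 1) + (xs.length : Int) := by
        simp at hb; omega
      simp only [PySem.List.enumerate_cons, List.flatMap_cons, pvG, if_neg h1, if_pos h2,
        ih (s + 1) (by omega) hht hb', d0, d1, List.take_succ_cons, List.drop_succ_cons]
      simp

theorem pv_enumerate_take {α : Type} (xs : List α) (n : Nat) (s : Int) :
    PySem.List.enumerate (xs.take n) s = (PySem.List.enumerate xs s).take n := by
  induction xs generalizing n s with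
  | nil => simp [PySem.List.enumerate_nil]
  | cons x xs ih =>
    cases n with
    | zero => simp
    | succ m => simp [PySem.List.enumerate_cons, ih]

theorem pv_enumerate_drop {α : Type} (xs : List α) (n : Nat) (s : Int) :
    PySem.List.enumerate (xs.drop n) (s + n) = (PySem.List.enumerate xs s).drop n := by
  induction xs generalizing n s with
  | nil => simp [PySem.List.enumerate_nil]
  | cons x xs ih =>
    cases n with
    | zero => simp
    | succ m =>
      simp only [List.drop_succ_cons, PySem.List.enumerate_cons]
      have : s + ((m : Int) + 1) = (s + 1) + (m : Int) := by ring
      simpa [Nat.cast_succ, this] using ih m (s + 1)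

theorem pv_join_cons (x : String) (b : List String) (hb : b ≠ []) :
    PySem.Str.join "\n" (x :: b) = x ++ "\n" ++ PySem.Str.join "\n" b := by
  cases b with
  | nil => simp at hb
  | cons y ys =>
    simp only [PySem.Str.join, PySem.Chars.join_cons_cons, List.map_cons]
    apply String.toList_injective
    simp [String.append_assoc]

theorem pv_join_split (a : List String) (m : String) (b : List String)
    (ha : a ≠ []) (hb : b ≠ []) :
    PySem.Str.join "\n" (a ++ m :: b)
      = PySem.Str.join "\n" a ++ "\n" ++ m ++ "\n" ++ PySem.Str.join "\n" b := by
  induction a with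
  | nil => simp at ha
  | cons x a ih =>
    cases a with
    | nil =>
      rw [List.singleton_append, pv_join_cons x (m :: b) (by simp), pv_join_cons m b hb]
      apply String.toList_injective
      simp [String.append_assoc, PySem.Str.join]
    | cons y a' =>
      rw [List.cons_append, pv_join_cons x ((y :: a') ++ m :: b) (by simp),
        ih (by simp), pv_join_cons x (y :: a') (by simp)]
      apply String.toList_injective
      simp [String.append_assoc]

-- ===== VERDICT =====
theorem format_content_hint_py_spec : Claim_equal_format_content_hint_py := by
  unfold Claim_equal_format_content_hint_py
  intro content path _
  unfold Spec_format_content_hint_py format_content_hint_py format_content_hint_py_alt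
  by_cases h : content = ""
  · simp [h]
  · simp only [h, if_false]
    set lines := PySem.Str.splitlines content with hl
    by_cases ht : (lines.length : Int) ≤ 200
    · simp only [ht, if_pos]
      rw [pv_parts, pv_short _ _ le_rfl]
    · simp only [ht, if_false]
      have hlen : 200 < lines.length := by exact_mod_cast lt_of_not_ge ht
      have hfd : PySem.Int.floordiv (200 * 2) 3 = (133 : Int) := by decide
      rw [hfd]
      rw [pv_parts, pv_long 133 ((lines.length : Int) - (200 - 133)) lines 0 (by norm_num)
        (by omega) (by omega)]
      -- A's head and tail as take/drop of the single enumeration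
      have hts : (lines.length : Int) - (200 - 133) = ((lines.length - 67 : Nat) : Int) := by
        push_cast; omega
      rw [PySem.List.slice_to _ (by norm_num : (0:Int) ≤ 133)]
      rw [show ((133 : Int).toNat) = 133 from rfl]
      rw [pv_enumerate_take]
      rw [hts, PySem.List.slice_from_natCast]
      have hdr := pv_enumerate_drop lines (lines.length - 67) 0
      rw [zero_add] at hdr
      rw [hdr]
      -- splice the join
      have ha : (((PySem.List.enumerate lines 0).take ((133:Int) - 0).toNat).map pvFmtLine) ≠ [] := by
        apply List.ne_nil_of_length_pos
        simp [PySem.List.length_enumerate]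
        omega
      have hbne : (((PySem.List.enumerate lines 0).drop
          (((lines.length : Nat) : Int) - (200 - 133) - 0).toNat).map pvFmtLine) ≠ [] := by
        apply List.ne_nil_of_length_pos
        simp [PySem.List.length_enumerate]
        omega
      rw [hts] at hbne
      rw [pv_join_split _ _ _ ha hbne]
      have e1 : ((133 : Int) - 0).toNat = 133 := by decide
      have e2 : ((((lines.length - 67 : Nat) : Int)) - 0).toNat = lines.length - 67 := by
        omega
      have e3 : (((lines.length - 67 : Nat) : Int)) - 133 = (lines.length : Int) - 133 - (200 - 133) := by
        push_cast; omega
      rw [e1, e2, e3]
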